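-- pv_equiv track=rewrite | github.com/fulber20/curso3 | seminario/semanas2clase/ejercicio1.py | lista_datos
-- ===== SOURCE A (Python) =====
-- def lista_datos(lista):
--   numeros_visto=set()
--   for numero in lista:
--     complemento= -numero
--     if complemento in numeros_visto:
--       return(numero,complemento)
--     numeros_visto.add(numero)
--   return None
-- ===== SOURCE B (Python) =====
-- def lista_datos(lista):
--   for i in range(len(lista)):
--     numero = lista[i]
--     for j in range(i):
--       if lista[j] == -numero:
--         return (numero, -numero)
--   return None
-- ===== Notes on version B (the rewrite author's own statement) =====
-- stated objective: alternative
-- what changed: Replaces the single-pass set of seen values with two nested index loops that scan the strictly-earlier prefix for the negation, keeping no auxiliary structure.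
import Mathlib
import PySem

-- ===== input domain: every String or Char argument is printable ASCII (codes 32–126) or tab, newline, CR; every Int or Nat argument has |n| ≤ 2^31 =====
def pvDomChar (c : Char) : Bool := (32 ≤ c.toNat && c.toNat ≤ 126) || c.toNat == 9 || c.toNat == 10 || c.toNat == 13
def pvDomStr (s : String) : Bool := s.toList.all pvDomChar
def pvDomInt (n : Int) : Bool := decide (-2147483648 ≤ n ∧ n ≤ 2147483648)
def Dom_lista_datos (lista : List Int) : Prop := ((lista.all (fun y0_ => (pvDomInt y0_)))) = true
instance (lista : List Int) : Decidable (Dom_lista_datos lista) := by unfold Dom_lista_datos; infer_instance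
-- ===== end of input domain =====

-- B replaces A's seen-set with two nested index loops scanning the strictly-earlier prefix (alternative decomposition, no auxiliary structure).

-- ===== PORT A =====
-- loop 'for numero in lista' carrying the set numeros_visto
def listaDatosGoA : List Int → PySem.Set Int → Option (Int × Int)
  | [], _ => none
  | numero :: rest, visto =>
    let complemento := -numero
    if PySem.Set.contains visto complemento then some (numero, complemento)
    else listaDatosGoA rest (PySem.Set.add visto numero)

def lista_datos (lista : List Int) : Option (Int × Int) :=
  listaDatosGoA lista PySem.Set.empty

-- ===== PORT B =====
-- outer loop 'for i in range(len(lista))' as recursion on the remaining count (fuel = len - i);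
-- inner loop 'for j in range(i)' as List.any over range i, with lista[j] via getD (indices always in range)
def listaDatosGoB (lista : List Int) : Nat → Nat → Option (Int × Int)
  | _, 0 => none
  | i, fuel + 1 =>
    let numero := lista.getD i 0
    if (List.range i).any (fun j => lista.getD j 0 == -numero) then some (numero, -numero)
    else listaDatosGoB lista (i + 1) fuel

def lista_datos_alt (lista : List Int) : Option (Int × Int) :=
  listaDatosGoB lista 0 lista.length

-- ===== PRECONDITION & SPEC =====
def Spec_lista_datos (lista : List Int) (out : Option (Int × Int)) : Prop := out = lista_datos_alt lista
instance (lista : List Int) (out : Option (Int × Int)) : Decidable (Spec_lista_datos lista out) := by unfold Spec_lista_datos; infer_instance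

-- ===== CLAIM (what is proved, stated in full; the proofs are below) =====
def Claim_equal_lista_datos : Prop := ∀ (lista : List Int), Dom_lista_datos lista → Spec_lista_datos lista (lista_datos lista)

-- ===== LEMMAS AND PROOFS =====

-- the seen-set membership test equals B's prefix scan
theorem contains_eq_any_range (pre : List Int) (c : Int) (rest : List Int) :
    PySem.Set.contains (PySem.Set.ofList pre) c
      = (List.range pre.length).any (fun j => (pre ++ rest).getD j 0 == c) := by
  by_cases h : c ∈ pre
  · have h1 : PySem.Set.contains (PySem.Set.ofList pre) c = true := by
      rw [PySem.Set.contains_iff, PySem.Set.mem_ofList]; exact h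
    obtain ⟨j, hj, hget⟩ := List.getElem_of_mem h
    have h2 : (List.range pre.length).any (fun j => (pre ++ rest).getD j 0 == c) = true := by
      rw [List.any_eq_true]
      refine ⟨j, List.mem_range.mpr hj, ?_⟩
      simp [List.getD, List.getElem?_append_left hj, hj, hget]
    rw [h1, h2]
  · have h1 : PySem.Set.contains (PySem.Set.ofList pre) c = false := by
      rw [Bool.eq_false_iff]
      intro hc
      exact h ((PySem.Set.mem_ofList pre c).mp ((PySem.Set.contains_iff _ _).mp hc))
    have h2 : (List.range pre.length).any (fun j => (pre ++ rest).getD j 0 == c) = false := by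
      rw [Bool.eq_false_iff]
      intro hc
      obtain ⟨j, hj, hget⟩ := List.any_eq_true.mp hc
      have hj' := List.mem_range.mp hj
      apply h
      have : (pre ++ rest).getD j 0 = pre[j] := by
        simp [List.getD, List.getElem?_append_left hj', List.getElem?_eq_getElem hj']
      rw [this] at hget
      exact (beq_iff_eq.mp hget) ▸ pre.getElem_mem hj'
    rw [h1, h2]


theorem goA_eq_goB (rest pre : List Int) :
    listaDatosGoA rest (PySem.Set.ofList pre)
      = listaDatosGoB (pre ++ rest) pre.length rest.length := by
  induction rest generalizing pre with
  | nil => simp [listaDatosGoA, listaDatosGoB]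
  | cons n rest ih =>
    show listaDatosGoA (n :: rest) (PySem.Set.ofList pre)
        = listaDatosGoB (pre ++ n :: rest) pre.length (rest.length + 1)
    rw [listaDatosGoA, listaDatosGoB]
    have hn : (pre ++ n :: rest).getD pre.length 0 = n := by
      simp [List.getD]
    rw [hn]
    rw [contains_eq_any_range pre (-n) (n :: rest)]
    cases hc : ((List.range pre.length).any (fun j => (pre ++ n :: rest).getD j 0 == -n)) with
    | true => simp
    | false =>
      simp only [Bool.false_eq_true, if_false]
      rw [← PySem.Set.ofList_append_singleton]
      have := ih (pre ++ [n])
      simpa using this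

-- ===== VERDICT (by name: the statement is the Claim_ definition above) =====
theorem lista_datos_spec : Claim_equal_lista_datos := by
  intro lista _
  unfold Spec_lista_datos lista_datos lista_datos_alt
  have := goA_eq_goB lista []
  simpa [PySem.Set.empty] using this
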